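-- pv_equiv track=rewrite | github.com/vinija/LeetCode | 1487-making-file-names-unique/1487-making-file-names-unique.py | getFolderNames
-- ===== SOURCE A (Python) =====
-- from typing import List
--
-- def getFolderNames(names: List[str]) -> List[str]:
--     # names : array of names
--     # n : size of names
--
--     # create folders at the i'th minute for each name = names[i]
--     # If name was used previously, append a suffix "(k)" - note parenthesis - where k is the smallest pos int
--
--     # return an array of strings where ans[i] is the actual saved variant of names[i]
--
--     n = len(names)
--
--     dictNames = {}
--     ans = ['']*n
--
--     # enumerate to grab index so we can return ans list in order
--     for idx, name in enumerate(names):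
--         # check if we have seen this name before
--         if name in dictNames:
--             # if we have grab the next k using last successful low (k) suffix
--             k = dictNames[name]
--             # track the name we started so we can update the dict
--             namestart = name
--             # cycle through values of increasing k until we are not in a previously used name
--             while name in dictNames:
--                 name = namestart + f"({k})"
--                 k += 1
--             # update the name we started with to the new lowest value of k
--             dictNames[namestart] = k
--             # add the new name with k = 1 so if we see this name with the suffix
--             dictNames[name] = 1
--         else:
--             # we havent seen this name so lets start with 1
--             dictNames[name] = 1
--         # build the solution
--         ans[idx] = name
--     return ans
-- ===== SOURCE B (Python) =====
-- from typing import List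
--
-- def getFolderNames(names: List[str]) -> List[str]:
--     # Simpler: one set of all assigned names; rescan k = 1, 2, ... each time,
--     # no per-base resume counter.
--     used = set()
--     ans = []
--     for name in names:
--         cand = name
--         k = 0
--         while cand in used:
--             k += 1
--             cand = f"{name}({k})"
--         used.add(cand)
--         ans.append(cand)
--     return ans
-- ===== Notes on version B (the rewrite author's own statement) =====
-- stated objective: simpler
-- what changed: Replaces the dict of per-base resume counters (value = next k to try, updated after each collision scan) with a single set of assigned names, rescanning k=1,2,... from scratch for every duplicate; no counter state is maintained.
import Mathlib
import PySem

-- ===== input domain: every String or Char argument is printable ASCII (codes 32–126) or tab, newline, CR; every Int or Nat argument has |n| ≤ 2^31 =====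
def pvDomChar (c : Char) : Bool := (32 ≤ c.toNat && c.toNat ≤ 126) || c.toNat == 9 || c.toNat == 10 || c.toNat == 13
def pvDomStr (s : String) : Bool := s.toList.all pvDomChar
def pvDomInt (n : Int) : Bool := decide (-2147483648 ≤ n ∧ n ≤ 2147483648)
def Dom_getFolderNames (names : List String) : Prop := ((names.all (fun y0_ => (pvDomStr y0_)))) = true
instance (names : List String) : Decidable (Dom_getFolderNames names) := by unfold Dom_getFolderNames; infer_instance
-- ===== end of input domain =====

-- B replaces A's dict of per-base resume counters with a single set of assigned
-- names, rescanning k = 1, 2, … from scratch for each duplicate (simpler).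


-- ===== PORT A =====
-- the 'while name in dictNames' loop of A; fuel = |dict| + 1 always suffices
-- (each successful test consumes a distinct key), so the port is exact
def aWhile (d : PySem.Dict String Int) (namestart : String) :
    Nat → String → Int → String × Int
  | 0, name, k => (name, k)
  | fuel + 1, name, k =>
    if d.contains name then
      aWhile d namestart fuel (namestart ++ "(" ++ PySem.Int.toStr k ++ ")") (k + 1)
    else (name, k)

-- one iteration of A's 'for idx, name in enumerate(names)' body (appending to
-- ans is A's 'ans[idx] = name' since idx walks 0,1,2,… in order)
def aStep (acc : PySem.Dict String Int × List String) (name : String) :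
    PySem.Dict String Int × List String :=
  let d := acc.1
  if d.contains name then
    let k := d.getD name 0
    let r := aWhile d name (d.items.length + 1) name k
    ((d.insert name r.2).insert r.1 1, acc.2 ++ [r.1])
  else
    (d.insert name 1, acc.2 ++ [name])

def getFolderNames (names : List String) : List String :=
  (names.foldl aStep (PySem.Dict.empty, ([] : List String))).2

-- ===== PORT B =====
-- the 'while cand in used' loop of B; fuel = |used| + 1 always suffices
def bWhile (u : PySem.Set String) (name : String) :
    Nat → String → Int → String
  | 0, cand, _ => cand
  | fuel + 1, cand, k =>
    if PySem.Set.contains u cand then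
      bWhile u name fuel (name ++ "(" ++ PySem.Int.toStr (k + 1) ++ ")") (k + 1)
    else cand

-- one iteration of B's 'for name in names' body
def bStep (acc : PySem.Set String × List String) (name : String) :
    PySem.Set String × List String :=
  let cand := bWhile acc.1 name (acc.1.length + 1) name 0
  (PySem.Set.add acc.1 cand, acc.2 ++ [cand])

def getFolderNames_alt (names : List String) : List String :=
  (names.foldl bStep (PySem.Set.empty, ([] : List String))).2

-- ===== PRECONDITION & SPEC =====
def Spec_getFolderNames (names : List String) (out : List String) : Prop := out = getFolderNames_alt names
instance (names : List String) (out : List String) : Decidable (Spec_getFolderNames names out) := by unfold Spec_getFolderNames; infer_instance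

-- ===== CLAIM (what is proved, stated in full; the proofs are below) =====
def Claim_equal_getFolderNames : Prop := ∀ (names : List String), Dom_getFolderNames names → Spec_getFolderNames names (getFolderNames names)

-- ===== LEMMAS AND PROOFS =====

-- the suffixed candidate name(j)
def pvSuff (base : String) (j : Int) : String :=
  base ++ "(" ++ PySem.Int.toStr j ++ ")"

-- generic scan for the first index ≥ k whose candidate is not occupied (P)
def pvScan (P : String → Bool) (base : String) : Nat → Int → Option Int
  | 0, _ => none
  | fuel + 1, k => if P (pvSuff base k) then pvScan P base fuel (k + 1) else some k

-- ---- injectivity of str(j) for j ≥ 0 (hence of pvSuff base ·) ----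
def pvDec (a : Nat) (ds : List Char) : Nat :=
  ds.foldl (fun x c => x * 10 + (c.toNat - 48)) a

def pvPush (a n : Nat) : Nat :=
  if _h : n < 10 then a * 10 + n
  else pvPush a (n / 10) * 10 + n % 10
  decreasing_by exact Nat.div_lt_self (by omega) (by omega)

lemma pvDigitChar_val (r : Nat) (h : r < 10) : (Nat.digitChar r).toNat - 48 = r := by
  interval_cases r <;> decide

lemma pvToDigitsCore_succ (f n : Nat) (ds : List Char) :
    Nat.toDigitsCore 10 (f+1) n ds =
      if n / 10 = 0 then (n % 10).digitChar :: ds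
      else Nat.toDigitsCore 10 f (n / 10) ((n % 10).digitChar :: ds) := by
  rw [Nat.toDigitsCore]

lemma pvDec_cons (a : Nat) (c : Char) (cs : List Char) :
    pvDec a (c :: cs) = pvDec (a * 10 + (c.toNat - 48)) cs := by
  simp [pvDec]

lemma pvDec_core : ∀ (f n : Nat) (ds : List Char) (a : Nat), n < f →
    pvDec a (Nat.toDigitsCore 10 f n ds) = pvDec (pvPush a n) ds := by
  intro f
  induction f with
  | zero => omega
  | succ f ih =>
    intro n ds a hn
    rw [pvToDigitsCore_succ]
    by_cases h0 : n / 10 = 0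
    · have hlt : n < 10 := by omega
      rw [if_pos h0, pvDec_cons, pvDigitChar_val _ (Nat.mod_lt _ (by omega)),
        Nat.mod_eq_of_lt hlt]
      conv_rhs => rw [pvPush]
      rw [dif_pos hlt]
    · rw [if_neg h0]
      have hstep : n / 10 < f := by
        have := Nat.div_lt_self (by omega : 0 < n) (by omega : 1 < 10)
        omega
      rw [ih (n / 10) _ _ hstep, pvDec_cons, pvDigitChar_val _ (Nat.mod_lt _ (by omega))]
      conv_rhs => rw [pvPush]
      rw [dif_neg (by omega : ¬ n < 10)]

lemma pvPush_zero (n : Nat) : pvPush 0 n = n := by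
  induction n using Nat.strong_induction_on with
  | _ n ih =>
    by_cases h : n < 10
    · rw [pvPush, dif_pos h]; omega
    · rw [pvPush, dif_neg h, ih (n / 10) (Nat.div_lt_self (by omega) (by omega))]
      omega

lemma pvToDigits_inj {m n : Nat} (h : Nat.toDigits 10 m = Nat.toDigits 10 n) : m = n := by
  have hm := pvDec_core (m + 1) m [] 0 (by omega)
  have hn := pvDec_core (n + 1) n [] 0 (by omega)
  have h' : Nat.toDigits 10 m = Nat.toDigitsCore 10 (m+1) m [] := rfl
  have h'' : Nat.toDigits 10 n = Nat.toDigitsCore 10 (n+1) n [] := rfl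
  rw [← h'] at hm
  rw [← h''] at hn
  rw [h, hn] at hm
  have hnm : n = m := by simpa [pvPush_zero, pvDec] using hm
  omega

lemma pvToStr_inj {i j : Int} (hi : 0 ≤ i) (hj : 0 ≤ j)
    (h : PySem.Int.toStr i = PySem.Int.toStr j) : i = j := by
  have h2 := congrArg String.toList h
  rw [PySem.Int.toList_toStr, PySem.Int.toList_toStr] at h2
  unfold PySem.Int.toChars at h2
  rw [if_neg (by omega), if_neg (by omega)] at h2
  have := pvToDigits_inj h2
  omega

lemma pvSuff_inj {base : String} {i j : Int} (hi : 1 ≤ i) (hj : 1 ≤ j)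
    (h : pvSuff base i = pvSuff base j) : i = j := by
  have h2 := congrArg String.toList h
  simp only [pvSuff, String.toList_append] at h2
  apply pvToStr_inj (by omega) (by omega)
  have h3 := List.append_cancel_right h2
  have h4 := List.append_cancel_left h3
  exact String.toList_injective h4

lemma pvSuff_ne_base (base : String) (j : Int) : pvSuff base j ≠ base := by
  intro h
  have h2 := congrArg (fun s => s.toList.length) h
  simp only [pvSuff, String.toList_append, List.length_append] at h2
  have : ("(" : String).toList.length = 1 := by decide
  have : (")" : String).toList.length = 1 := by decide
  omega

-- ---- pvScan properties ----
lemma pvScan_none {P : String → Bool} {base : String} :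
    ∀ {fuel : Nat} {k : Int}, pvScan P base fuel k = none →
    ∀ i : Nat, i < fuel → P (pvSuff base (k + i)) = true := by
  intro fuel
  induction fuel with
  | zero => intro k _ i hi; omega
  | succ f ih =>
    intro k h i hi
    rw [pvScan] at h
    by_cases hp : P (pvSuff base k) = true
    · rw [if_pos hp] at h
      match i with
      | 0 => simpa using hp
      | i' + 1 =>
        have := ih h i' (by omega)
        have e : k + (↑(i' + 1) : Int) = (k + 1) + ↑i' := by push_cast; ring
        rw [e]
        exact this
    · rw [if_neg hp] at h
      simp at h

lemma pvScan_some {P : String → Bool} {base : String} :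
    ∀ {fuel : Nat} {k N : Int}, pvScan P base fuel k = some N →
    P (pvSuff base N) = false ∧ k ≤ N ∧ ∀ j : Int, k ≤ j → j < N → P (pvSuff base j) = true := by
  intro fuel
  induction fuel with
  | zero => intro k N h; simp [pvScan] at h
  | succ f ih =>
    intro k N h
    rw [pvScan] at h
    by_cases hp : P (pvSuff base k) = true
    · rw [if_pos hp] at h
      obtain ⟨h1, h2, h3⟩ := ih h
      refine ⟨h1, by omega, fun j hj1 hj2 => ?_⟩
      by_cases hjk : j = k
      · rwa [hjk]
      · exact h3 j (by omega) hj2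
    · rw [if_neg hp] at h
      obtain rfl : k = N := by simpa using h
      exact ⟨by simpa using hp, le_refl _, fun j h1 h2 => by omega⟩

-- a free candidate is always found: the occupied candidates with index ≥ 1 are
-- pairwise distinct strings inside l, so at most l.length of them exist
lemma pvScan_ex (P : String → Bool) (l : List String) (base : String) (k : Int) (fuel : Nat)
    (hk : 1 ≤ k)
    (hP : ∀ j : Int, 1 ≤ j → P (pvSuff base j) = true → pvSuff base j ∈ l)
    (hf : l.length < fuel) :
    ∃ N, pvScan P base fuel k = some N := by
  cases h : pvScan P base fuel k with
  | some N => exact ⟨N, rfl⟩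
  | none =>
    exfalso
    have hall := pvScan_none h
    have hmem : ∀ i ∈ Finset.range fuel, pvSuff base (k + i) ∈ l.toFinset := by
      intro i hi
      rw [List.mem_toFinset]
      exact hP _ (by omega) (hall i (by simpa using hi))
    have hinj : Set.InjOn (fun i : Nat => pvSuff base (k + i)) (Finset.range fuel) := by
      intro i _ j _ hij
      have := pvSuff_inj (by omega) (by omega) hij
      omega
    have hcard := Finset.card_le_card_of_injOn _ hmem hinj
    simp at hcard
    have := l.toFinset_card_le
    omega

-- ---- characterizations of the two while loops via pvScan ----
lemma aWhile_eq {d : PySem.Dict String Int} {base : String} :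
    ∀ {fuel : Nat} {name : String} {k N : Int}, d.contains name = true →
    pvScan (fun s => d.contains s) base fuel k = some N →
    aWhile d base (fuel + 1) name k = (pvSuff base N, N + 1) := by
  intro fuel
  induction fuel with
  | zero => intro name k N _ h; simp [pvScan] at h
  | succ f ih =>
    intro name k N hc h
    rw [aWhile, if_pos hc]
    rw [pvScan] at h
    by_cases hp : d.contains (pvSuff base k) = true
    · rw [if_pos hp] at h
      exact ih hp h
    · rw [if_neg hp] at h
      obtain rfl : k = N := by simpa using h
      rw [aWhile]
      simp only [pvSuff] at hp ⊢
      rw [if_neg hp]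

lemma bWhile_eq {u : PySem.Set String} {base : String} :
    ∀ {fuel : Nat} {cand : String} {k N : Int}, PySem.Set.contains u cand = true →
    pvScan (fun s => PySem.Set.contains u s) base fuel (k + 1) = some N →
    bWhile u base (fuel + 1) cand k = pvSuff base N := by
  intro fuel
  induction fuel with
  | zero => intro cand k N _ h; simp [pvScan] at h
  | succ f ih =>
    intro cand k N hc h
    rw [bWhile, if_pos hc]
    rw [pvScan] at h
    by_cases hp : PySem.Set.contains u (pvSuff base (k + 1)) = true
    · rw [if_pos hp] at h
      exact ih hp h
    · rw [if_neg hp] at h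
      obtain rfl : k + 1 = N := by simpa using h
      rw [bWhile]
      simp only [pvSuff] at hp ⊢
      rw [if_neg hp]

-- ---- the coupling invariant: same membership, and A's stored counter v for a
-- base s means every candidate s(1) … s(v-1) is already assigned ----
def pvInv (d : PySem.Dict String Int) (u : PySem.Set String) : Prop :=
  (∀ s : String, d.contains s = PySem.Set.contains u s) ∧
  (∀ (s : String) (v : Int), d.get? s = some v →
    1 ≤ v ∧ ∀ j : Int, 1 ≤ j → j < v → d.contains (pvSuff s j) = true)

lemma pvUMem (v : PySem.Set String) (s : String) :
    PySem.Set.contains v s = true ↔ s ∈ v := by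
  simp [PySem.Set.contains]

lemma pvMono {d : PySem.Dict String Int} {y : String} (h : d.contains y = true)
    (k : String) (v : Int) : (d.insert k v).contains y = true := by
  rw [PySem.Dict.contains_insert, h, Bool.or_true]

lemma pvLeast_eq' {P : String → Bool} {base : String} {k N N' : Int}
    (hk : 1 ≤ k)
    (h1 : P (pvSuff base N) = false) (h2 : k ≤ N)
    (h3 : ∀ j : Int, k ≤ j → j < N → P (pvSuff base j) = true)
    (hlow : ∀ j : Int, 1 ≤ j → j < k → P (pvSuff base j) = true)
    (h1' : P (pvSuff base N') = false) (h2' : 1 ≤ N')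
    (h3' : ∀ j : Int, 1 ≤ j → j < N' → P (pvSuff base j) = true) : N = N' := by
  rcases lt_trichotomy N N' with h | h | h
  · have := h3' N (by omega) h
    simp [h1] at this
  · exact h
  · by_cases hNk : N' < k
    · have := hlow N' h2' hNk
      simp [h1'] at this
    · have := h3 N' (by omega) h
      simp [h1'] at this

lemma pvStep (d : PySem.Dict String Int) (u : PySem.Set String) (ans : List String)
    (name : String) (h : pvInv d u) :
    ∃ r d' u', aStep (d, ans) name = (d', ans ++ [r]) ∧
      bStep (u, ans) name = (u', ans ++ [r]) ∧ pvInv d' u' := by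
  obtain ⟨hm, hcnt⟩ := h
  by_cases hc : d.contains name = true
  · -- seen before: both sides pick the first free candidate name(N)
    have hcu : PySem.Set.contains u name = true := by rw [← hm]; exact hc
    have hnameu : name ∈ u := (pvUMem u name).mp hcu
    have hnamek : name ∈ d.keys := (PySem.Dict.contains_iff_mem_keys d name).mp hc
    obtain ⟨k, hk⟩ : ∃ k, d.get? name = some k :=
      Option.isSome_iff_exists.mp (by rw [← PySem.Dict.contains_eq_isSome_get?]; exact hc)
    obtain ⟨hk1, hklow⟩ := hcnt name k hk
    have hgetD : d.getD name 0 = k := by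
      rw [PySem.Dict.getD_eq_get?_getD, hk]; rfl
    obtain ⟨N, hscanA⟩ := pvScan_ex (fun s => d.contains s) (d.keys.erase name) name k
      d.items.length hk1
      (fun j hj hcj => (List.mem_erase_of_ne (pvSuff_ne_base name j)).mpr
        ((PySem.Dict.contains_iff_mem_keys d _).mp hcj))
      (by
        rw [List.length_erase_of_mem hnamek]
        have h1 : 0 < d.keys.length := List.length_pos_of_mem hnamek
        have h2 : d.keys.length = d.items.length := by simp [PySem.Dict.keys]
        omega)
    obtain ⟨hNfree, hNge, hNmid⟩ := pvScan_some hscanA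
    have hA : aWhile d name (d.items.length + 1) name k = (pvSuff name N, N + 1) :=
      aWhile_eq hc hscanA
    obtain ⟨N', hscanB⟩ := pvScan_ex (fun s => d.contains s) (u.erase name) name 1
      u.length (le_refl 1)
      (fun j hj hcj => (List.mem_erase_of_ne (pvSuff_ne_base name j)).mpr
        ((pvUMem u _).mp (by rw [← hm]; exact hcj)))
      (by
        rw [List.length_erase_of_mem hnameu]
        have : 0 < u.length := List.length_pos_of_mem hnameu
        omega)
    obtain ⟨hNfree', hNge', hNmid'⟩ := pvScan_some hscanB
    have hPeq : (fun s => PySem.Set.contains u s) = (fun s => d.contains s) :=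
      funext fun s => (hm s).symm
    have hB : bWhile u name (u.length + 1) name 0 = pvSuff name N' := by
      apply bWhile_eq hcu
      rw [hPeq]
      norm_num
      exact hscanB
    have hNN : N = N' :=
      pvLeast_eq' hk1 hNfree hNge hNmid hklow hNfree' hNge' hNmid'
    refine ⟨pvSuff name N, (d.insert name (N + 1)).insert (pvSuff name N) 1,
      PySem.Set.add u (pvSuff name N), ?_, ?_, ?_, ?_⟩
    · simp only [aStep, hc, if_pos, hgetD, hA]
    · simp only [bStep, hB, ← hNN]
    · -- membership equality is preserved
      intro s
      rw [Bool.eq_iff_iff]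
      simp only [PySem.Dict.contains_insert, Bool.or_eq_true, beq_iff_eq, hm s,
        pvUMem, PySem.Set.mem_add]
      constructor
      · rintro (h1 | h1 | h1)
        · exact Or.inr h1
        · exact Or.inl (h1 ▸ hnameu)
        · exact Or.inl h1
      · rintro (h1 | h1)
        · exact Or.inr (Or.inr h1)
        · exact Or.inl h1
    · -- the counter invariant is preserved
      intro s v hv
      rw [PySem.Dict.get?_insert, PySem.Dict.get?_insert] at hv
      by_cases hs1 : s = pvSuff name N
      · rw [if_pos hs1] at hv
        obtain rfl : (1 : Int) = v := by simpa using hv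
        exact ⟨le_refl _, fun j h1 h2 => by omega⟩
      · rw [if_neg hs1] at hv
        by_cases hs2 : s = name
        · rw [if_pos hs2] at hv
          obtain rfl : N + 1 = v := by simpa using hv
          subst hs2
          refine ⟨by omega, fun j h1 h2 => ?_⟩
          by_cases hjN : j = N
          · subst hjN
            rw [PySem.Dict.contains_insert]
            simp
          · apply pvMono
            apply pvMono
            by_cases hjk : j < k
            · exact hklow j h1 hjk
            · exact hNmid j (by omega) (by omega)
        · rw [if_neg hs2] at hv
          obtain ⟨hv1, hv2⟩ := hcnt s v hv
          exact ⟨hv1, fun j h1 h2 => pvMono (pvMono (hv2 j h1 h2) _ _) _ _⟩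
  · -- fresh name: both sides output it unchanged
    have hc' : d.contains name = false := by simpa using hc
    have hcu : PySem.Set.contains u name = false := by rw [← hm]; exact hc'
    have hB : bWhile u name (u.length + 1) name 0 = name := by
      rw [bWhile, hcu]
      simp
    refine ⟨name, d.insert name 1, PySem.Set.add u name, ?_, ?_, ?_, ?_⟩
    · simp only [aStep, hc', Bool.false_eq_true, if_false]
    · simp only [bStep, hB]
    · intro s
      rw [Bool.eq_iff_iff]
      simp only [PySem.Dict.contains_insert, Bool.or_eq_true, beq_iff_eq, hm s,
        pvUMem, PySem.Set.mem_add]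
      tauto
    · intro s v hv
      rw [PySem.Dict.get?_insert] at hv
      by_cases hs : s = name
      · rw [if_pos hs] at hv
        obtain rfl : (1 : Int) = v := by simpa using hv
        exact ⟨le_refl _, fun j h1 h2 => by omega⟩
      · rw [if_neg hs] at hv
        obtain ⟨hv1, hv2⟩ := hcnt s v hv
        exact ⟨hv1, fun j h1 h2 => pvMono (hv2 j h1 h2) _ _⟩

lemma pvFold : ∀ (names : List String) (d : PySem.Dict String Int) (u : PySem.Set String)
    (ans : List String), pvInv d u →
    (names.foldl aStep (d, ans)).2 = (names.foldl bStep (u, ans)).2 := by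
  intro names
  induction names with
  | nil => intro d u ans _; rfl
  | cons name rest ih =>
    intro d u ans h
    obtain ⟨r, d', u', ha, hb, hinv⟩ := pvStep d u ans name h
    simp only [List.foldl_cons, ha, hb]
    exact ih d' u' (ans ++ [r]) hinv

-- ===== VERDICT (by name: the statement is the Claim_ definition above) =====
theorem getFolderNames_spec : Claim_equal_getFolderNames := by
  intro names _
  unfold Spec_getFolderNames getFolderNames getFolderNames_alt
  apply pvFold
  constructor
  · intro s; rfl
  · intro s v hv; simp [PySem.Dict.get?_empty] at hv
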